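-- pv_equiv track=rewrite | github.com/ASSERT-KTH/Mokav | experiments/pynguin/c4b/single-return/generated_tests/src_472/4/src_472.py | func
-- ===== SOURCE A (Python) =====
-- def func(*args):
--
-- 	s = args[0].strip()
-- 	c = 0
-- 	if (len(s) > 2):
-- 	    c += s.count('VK')
-- 	    l = s.split('VK')
-- 	    for i in l:
-- 	        if (('VV' in i) or ('KK' in i)):
-- 	            c += 1
-- 	            break
-- 	elif ((len(s) == 2) and (s != 'KV')):
-- 	    c = 1
-- 	return(c)
-- ===== SOURCE B (Python) =====
-- def func(*args):
--     s = args[0].strip()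
--     if len(s) > 2:
--         c = 0
--         flag = False
--         prev = None
--         i = 0
--         while i < len(s):
--             if s[i:i+2] == 'VK':
--                 c += 1
--                 i += 2
--                 prev = None
--             else:
--                 if prev is not None and s[i] == prev and (s[i] == 'V' or s[i] == 'K'):
--                     flag = True
--                 prev = s[i]
--                 i += 1
--         return c + (1 if flag else 0)
--     elif len(s) == 2 and s != 'KV':
--         return 1
--     else:
--         return 0
-- ===== Notes on version B (the rewrite author's own statement) =====
-- stated objective: alternative
-- what changed: Replaces count+split on the two-char marker plus a loop over the resulting pieces with a single left-to-right index scan that counts greedy non-overlapping marker matches and detects a doubled V/K between matches with a previous-character flag, in one pass and no intermediate list.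
import Mathlib
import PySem

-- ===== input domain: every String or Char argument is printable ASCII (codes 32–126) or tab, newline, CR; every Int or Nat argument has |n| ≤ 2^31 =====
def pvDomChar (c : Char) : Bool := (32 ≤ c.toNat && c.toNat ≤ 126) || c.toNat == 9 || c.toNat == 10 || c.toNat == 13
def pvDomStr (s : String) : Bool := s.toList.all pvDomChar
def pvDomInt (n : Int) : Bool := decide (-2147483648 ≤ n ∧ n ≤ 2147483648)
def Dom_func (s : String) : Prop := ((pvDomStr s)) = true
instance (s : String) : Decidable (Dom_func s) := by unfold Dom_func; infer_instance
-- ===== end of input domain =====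

-- B replaces A's count('VK') + split('VK') + piece scan by a single left-to-right scan
-- (same O(n) cost, one pass, no intermediate list); return values proved equal on all inputs.

-- ===== PORT A =====
-- A's 'for i in l: if 'VV' in i or 'KK' in i: c += 1; break'
def loopA : List String → Int → Int
  | [], c => c
  | p :: rest, c =>
    if PySem.Str.isIn "VV" p || PySem.Str.isIn "KK" p then c + 1 else loopA rest c

def func (s0 : String) : Int :=
  let s := PySem.Str.strip s0
  let c : Int := 0
  if PySem.Str.len s > 2 then
    let c := c + (PySem.Str.count s "VK" : Int)
    let l := (PySem.Str.split? s "VK").getD []   -- sep "VK" ≠ "", so split? is some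
    loopA l c
  else if PySem.Str.len s = 2 ∧ s ≠ "KV" then 1
  else c

-- ===== PORT B =====
-- Source B's while loop over index i: recursion over the remaining characters,
-- carrying (prev, c, flag); s[i:i+2] == 'VK' is 'take 2 = [V,K]'.
def scanB : List Char → Option Char → Int → Bool → Int × Bool
  | [], _, c, flag => (c, flag)
  | x :: rest, prev, c, flag =>
    if (x :: rest).take 2 = ['V', 'K'] then
      scanB rest.tail none (c + 1) flag
    else
      scanB rest (some x) c (flag || (prev == some x && (x == 'V' || x == 'K')))
  termination_by l _ _ _ => l.length
  decreasing_by all_goals (simp [List.length_tail]; try omega)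

def func_alt (s0 : String) : Int :=
  let s := PySem.Str.strip s0
  if PySem.Str.len s > 2 then
    let r := scanB s.toList none 0 false
    r.1 + (if r.2 then 1 else 0)
  else if PySem.Str.len s = 2 ∧ s ≠ "KV" then 1
  else 0

-- ===== PRECONDITION & SPEC =====
def Spec_func (s : String) (out : Int) : Prop := out = func_alt s
instance (s : String) (out : Int) : Decidable (Spec_func s out) := by unfold Spec_func; infer_instance

-- ===== CLAIM (what is proved, stated in full; the proofs are below) =====
def Claim_equal_func : Prop := ∀ (s : String), Dom_func s → Spec_func s (func s)

-- ===== LEMMAS AND PROOFS =====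

-- the greedy non-overlapping decomposition of l at 'VK' (proof-side mirror of split('VK'))
def pieces : List Char → List (List Char)
  | [] => [[]]
  | x :: rest =>
    if (x :: rest).take 2 = ['V', 'K'] then [] :: pieces rest.tail
    else (pieces rest).modifyHead (x :: ·)
  termination_by l => l.length
  decreasing_by all_goals (simp [List.length_tail]; try omega)

def hasDbl (cs : List Char) : Bool := PySem.Chars.isIn ['V','V'] cs || PySem.Chars.isIn ['K','K'] cs

theorem pieces_ne_nil (l : List Char) : pieces l ≠ [] := by
  induction l using pieces.induct with
  | case1 => simp [pieces]
  | case2 x rest h ih => simp [pieces, h]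
  | case3 x rest h ih =>
    rcases hp : pieces rest with _ | ⟨a, b⟩
    · exact absurd hp ih
    · rw [pieces, if_neg h, hp]; simp

theorem prefixVK_iff (l : List Char) : (['V','K'].isPrefixOf l = true) ↔ l.take 2 = ['V','K'] := by
  rw [List.isPrefixOf_iff_prefix, List.prefix_iff_eq_take]
  constructor <;> (intro h; exact h.symm)

theorem drop_tail (x : Char) (rest : List Char) (h : List.take 2 (x :: rest) = ['V','K']) :
    List.drop (['V','K'] : List Char).length (x :: rest) = rest.tail := by
  cases rest <;> simp_all

theorem tail_len_le (rest : List Char) (f : Nat) (hf : rest.length ≤ f) :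
    rest.tail.length ≤ f := by
  rw [List.length_tail]; omega

theorem P_count (l : List Char) : ∀ (fuel : Nat) (acc : Nat), l.length ≤ fuel →
    PySem.Chars.count.go ['V','K'] fuel l acc = acc + ((pieces l).length - 1) := by
  induction l using pieces.induct with
  | case1 =>
    intro fuel acc _
    cases fuel <;> simp [PySem.Chars.count.go, pieces]
  | case2 x rest h ih =>
    intro fuel acc hf
    obtain ⟨f, rfl⟩ : ∃ f, fuel = f + 1 := ⟨fuel - 1, by simp at hf ⊢; omega⟩
    rw [PySem.Chars.count.go]
    rw [if_pos ((prefixVK_iff _).mpr h)]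
    simp only [List.length_cons] at hf
    rw [drop_tail x rest h, ih f (acc + 1) (tail_len_le rest f (by omega))]
    have hne : 1 ≤ (pieces rest.tail).length := List.length_pos_of_ne_nil (pieces_ne_nil _)
    rw [pieces, if_pos h]
    simp only [List.length_cons]
    omega
  | case3 x rest h ih =>
    intro fuel acc hf
    obtain ⟨f, rfl⟩ : ∃ f, fuel = f + 1 := ⟨fuel - 1, by simp at hf ⊢; omega⟩
    rw [PySem.Chars.count.go]
    rw [if_neg (by rw [prefixVK_iff]; exact h)]
    simp only [List.length_cons] at hf
    rw [ih f acc (by omega)]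
    rw [pieces, if_neg h]
    rcases hp : pieces rest with _ | ⟨a, b⟩
    · exact absurd hp (pieces_ne_nil rest)
    · simp

theorem P_split (l : List Char) : ∀ (fuel : Nat) (cur : List Char) (acc : List (List Char)),
    l.length ≤ fuel →
    PySem.Chars.splitOn.go ['V','K'] fuel l cur acc
      = acc.reverse ++ (pieces l).modifyHead (cur.reverse ++ ·) := by
  induction l using pieces.induct with
  | case1 =>
    intro fuel cur acc _
    cases fuel <;> simp [PySem.Chars.splitOn.go, pieces]
  | case2 x rest h ih =>
    intro fuel cur acc hf
    obtain ⟨f, rfl⟩ : ∃ f, fuel = f + 1 := ⟨fuel - 1, by simp at hf ⊢; omega⟩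
    rw [PySem.Chars.splitOn.go]
    rw [if_pos ((prefixVK_iff _).mpr h)]
    simp only [List.length_cons] at hf
    rw [drop_tail x rest h, ih f [] (cur.reverse :: acc) (tail_len_le rest f (by omega))]
    rw [pieces, if_pos h]
    cases hp : pieces rest.tail <;> simp
  | case3 x rest h ih =>
    intro fuel cur acc hf
    obtain ⟨f, rfl⟩ : ∃ f, fuel = f + 1 := ⟨fuel - 1, by simp at hf ⊢; omega⟩
    rw [PySem.Chars.splitOn.go]
    rw [if_neg (by rw [prefixVK_iff]; exact h)]
    simp only [List.length_cons] at hf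
    rw [ih f (x :: cur) acc (by omega)]
    rw [pieces, if_neg h]
    rcases hp : pieces rest with _ | ⟨a, b⟩
    · exact absurd hp (pieces_ne_nil rest)
    · simp

theorem hasDbl_short (l : List Char) (h : l.length ≤ 1) : hasDbl l = false := by
  unfold hasDbl
  rw [Bool.or_eq_false_iff]
  constructor <;>
  · rw [PySem.Chars.isIn_eq_false_iff]
    intro hin
    have := hin.sublist.length_le
    simp at this
    omega

theorem hasDbl_cons_cons (p x : Char) (h : List Char) :
    hasDbl (p :: x :: h) = ((p == x && (x == 'V' || x == 'K')) || hasDbl (x :: h)) := by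
  rw [Bool.eq_iff_iff]
  unfold hasDbl
  simp only [Bool.or_eq_true, Bool.and_eq_true, beq_iff_eq,
    PySem.Chars.isIn_iff_infix, List.infix_cons_iff, List.cons_prefix_cons]
  constructor
  · rintro (((⟨h1, h2, _⟩ | h1) | h1) | ((⟨h1, h2, _⟩ | h1) | h1)) <;> subst_vars <;> simp_all <;> tauto
  · rintro (⟨h1, (h2 | h2)⟩ | (h1 | h1) | (h1 | h1)) <;> simp_all <;> tauto

def optCons : Option Char → List Char → List Char
  | none, l => l
  | some c, l => c :: l

theorem MAIN (l : List Char) : ∀ (prev : Option Char) (c : Int) (flag : Bool),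
    scanB l prev c flag
      = (c + (((pieces l).length : Int) - 1),
         flag || hasDbl (optCons prev ((pieces l).headD []))
              || ((pieces l).tail.any hasDbl)) := by
  induction l using pieces.induct with
  | case1 =>
    intro prev c flag
    rw [scanB, pieces]
    have : hasDbl (optCons prev []) = false := by
      apply hasDbl_short; cases prev <;> simp [optCons]
    simp [this]
  | case2 x rest h ih =>
    intro prev c flag
    rw [scanB, if_pos h, pieces, if_pos h]
    rw [ih]
    rcases hp : pieces rest.tail with _ | ⟨a, b⟩
    · exact absurd hp (pieces_ne_nil _)
    · refine Prod.ext (by simp; ring) ?_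
      cases prev with
      | none => simp [optCons, hasDbl_short [] (by simp), Bool.or_assoc]
      | some p => simp [optCons, hasDbl_short [p] (by simp), Bool.or_assoc]
  | case3 x rest h ih =>
    intro prev c flag
    rw [scanB, if_neg h, pieces, if_neg h]
    rw [ih]
    rcases hp : pieces rest with _ | ⟨a, b⟩
    · exact absurd hp (pieces_ne_nil _)
    · refine Prod.ext (by simp) ?_
      simp only [List.modifyHead_cons, List.headD_cons, List.tail_cons]
      cases prev with
      | none => simp [optCons, Bool.or_assoc]
      | some p => simp [optCons, hasDbl_cons_cons, Bool.or_assoc]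

theorem loopA_eq (ps : List String) (c : Int) :
    loopA ps c = c + (if ps.any (fun p => hasDbl p.toList) then 1 else 0) := by
  induction ps with
  | nil => simp [loopA]
  | cons p rest ih =>
    rw [loopA]
    have hb : (PySem.Str.isIn "VV" p || PySem.Str.isIn "KK" p) = hasDbl p.toList := by
      rw [PySem.Str.isIn_eq, PySem.Str.isIn_eq]; rfl
    rw [hb, ih]
    cases hd : hasDbl p.toList <;> simp [hd]

theorem split_eq_pieces (t : List Char) :
    PySem.Chars.splitOn t ['V','K'] = pieces t := by
  unfold PySem.Chars.splitOn
  rw [P_split t (t.length + 1) [] [] (by omega)]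
  rcases hp : pieces t with _ | ⟨a, b⟩
  · exact absurd hp (pieces_ne_nil _)
  · simp

theorem count_eq_pieces (t : List Char) :
    PySem.Chars.count t ['V','K'] = (pieces t).length - 1 := by
  unfold PySem.Chars.count
  rw [if_neg (by simp)]
  rw [P_count t t.length 0 (le_refl _)]
  omega

-- ===== VERDICT (by name: the statement is the Claim_ definition above) =====
theorem func_spec : Claim_equal_func := by
  intro s _
  unfold Spec_func func func_alt
  simp only []
  set t := PySem.Str.strip s with ht
  by_cases hlen : PySem.Str.len t > 2
  · rw [if_pos hlen, if_pos hlen]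
    -- pieces facts
    have hne := pieces_ne_nil t.toList
    rcases hp : pieces t.toList with _ | ⟨a, b⟩
    · exact absurd hp hne
    -- split? on a String: recover the String-level list from the Chars-level one
    · have hsplit : ∃ ps : List String, PySem.Str.split? t "VK" = some ps ∧
          ps.map String.toList = a :: b := by
        have hm := PySem.Str.split?_map t "VK"
        rw [show ("VK" : String).toList = ['V','K'] from rfl] at hm
        rw [PySem.Chars.split?] at hm
        rw [if_neg (by simp)] at hm
        rw [split_eq_pieces, hp] at hm
        rcases hs : PySem.Str.split? t "VK" with _ | ps
        · rw [hs] at hm; simp at hm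
        · rw [hs] at hm; simp at hm
          exact ⟨ps, rfl, hm⟩
      obtain ⟨ps, hps, hmap⟩ := hsplit
      rw [hps]
      simp only [Option.getD_some]
      rw [loopA_eq]
      have hany : ps.any (fun p => hasDbl p.toList) = (a :: b).any hasDbl := by
        rw [← hmap, List.any_map]
        rfl
      rw [hany]
      rw [MAIN t.toList none 0 false, hp]
      simp only [List.headD_cons, List.tail_cons, optCons, Bool.false_or]
      rw [PySem.Str.count_eq]
      rw [show ("VK" : String).toList = ['V','K'] from rfl]
      rw [count_eq_pieces, hp]
      have hlen1 : (pieces t.toList).length ≥ 1 := by rw [hp]; simp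
      rw [hp] at hlen1
      simp only [List.any_cons]
      have hc : ((((a :: b).length - 1 : Nat)) : Int) = (((a :: b).length : Nat) : Int) - 1 := by
        simp only [List.length_cons]; push_cast; ring
      rw [hc]
      rfl
  · rw [if_neg hlen, if_neg hlen]
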